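-- pv_equiv track=rewrite | github.com/jamesdmeldrum/fathersday | django_project/sports/indy_getter.py | filter_shit_out
-- ===== SOURCE A (Python) =====
-- def filter_shit_out(text):
--     text = list(text)
--     new = []
--
--     letters_numbers = list("ABCDEFGHIJKLMNOPQRSTUVWXYZabcdefghijklmnopqrstuvwxyz0123456789")
--
--     add_to_list = False
--     last_space = False
--     for i in text:
--         if i in letters_numbers:
--             new.append(i)
--             add_to_list = True
--         else:
--             if add_to_list == True:
--                 new.append(i)
--                 last_space = True
--                 add_to_list = False
--             elif last_space == True:
--                 new.pop(len(new)-1)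
--                 return ''.join(new)
--     return ''.join(new)
-- ===== SOURCE B (Python) =====
-- def filter_shit_out(text):
--     chars = list(text)
--     alnum = set("ABCDEFGHIJKLMNOPQRSTUVWXYZabcdefghijklmnopqrstuvwxyz0123456789")
--     n = len(chars)
--     start = 0
--     while start < n and chars[start] not in alnum:
--         start += 1
--     end = n
--     for i in range(start, n - 1):
--         if chars[i] not in alnum and chars[i + 1] not in alnum:
--             end = i
--             break
--     return ''.join(chars[start:end])
-- ===== Notes on version B (the rewrite author's own statement) =====
-- stated objective: simpler
-- what changed: Replaced A's append/flag/pop state machine (flags add_to_list/last_space, conditional append and pop-before-return) by two index scans that locate the first alphanumeric character and the first adjacent non-alphanumeric pair, returning the slice between them.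
import Mathlib
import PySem

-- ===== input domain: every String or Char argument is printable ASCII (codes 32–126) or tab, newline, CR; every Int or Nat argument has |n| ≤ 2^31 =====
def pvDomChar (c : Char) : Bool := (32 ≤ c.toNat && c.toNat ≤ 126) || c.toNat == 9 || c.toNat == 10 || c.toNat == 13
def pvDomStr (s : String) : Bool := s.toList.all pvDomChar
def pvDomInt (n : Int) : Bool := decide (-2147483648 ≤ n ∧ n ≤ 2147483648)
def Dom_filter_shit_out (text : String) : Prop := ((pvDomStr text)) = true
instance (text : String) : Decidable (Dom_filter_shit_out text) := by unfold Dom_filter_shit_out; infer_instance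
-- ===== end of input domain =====

-- B replaces A's append/flag/pop state machine by two index scans (first alnum char,
-- then first adjacent non-alnum pair) and returns the slice between them; objective: simpler.

-- ===== PORT A =====
def pvLettersA : List Char :=
  "ABCDEFGHIJKLMNOPQRSTUVWXYZabcdefghijklmnopqrstuvwxyz0123456789".toList

-- the for-loop of A with its early return; state = (new, add_to_list, last_space)
def pvLoopA : List Char → List Char → Bool → Bool → List Char
  | [], new, _, _ => new
  | i :: rest, new, add, last =>
    if pvLettersA.contains i then pvLoopA rest (new ++ [i]) true last
    else if add then pvLoopA rest (new ++ [i]) false true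
    else if last then new.dropLast          -- new.pop(len(new)-1); return ''.join(new)
    else pvLoopA rest new add last

def filter_shit_out (text : String) : String :=
  String.mk (pvLoopA text.toList [] false false)

-- ===== PORT B =====
def pvAlnumB : PySem.Set Char :=
  PySem.Set.ofList "ABCDEFGHIJKLMNOPQRSTUVWXYZabcdefghijklmnopqrstuvwxyz0123456789".toList

-- while start < n and chars[start] not in alnum: start += 1
def pvStartB : List Char → Nat
  | [] => 0
  | c :: r => if pvAlnumB.contains c then 0 else pvStartB r + 1

-- for i in range(start, n-1): first i (relative to the suffix) with chars[i], chars[i+1] both non-alnum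
def pvEndB : List Char → Option Nat
  | c :: d :: r =>
    if !pvAlnumB.contains c && !pvAlnumB.contains d then some 0
    else (pvEndB (d :: r)).map (· + 1)
  | _ => none

def filter_shit_out_alt (text : String) : String :=
  let chars := text.toList
  let s := pvStartB chars
  let e := match pvEndB (chars.drop s) with
    | some k => s + k
    | none => chars.length
  String.mk ((chars.drop s).take (e - s))   -- chars[start:end]

-- ===== PRECONDITION & SPEC =====
def Spec_filter_shit_out (text : String) (out : String) : Prop := out = filter_shit_out_alt text
instance (text : String) (out : String) : Decidable (Spec_filter_shit_out text out) := by unfold Spec_filter_shit_out; infer_instance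

-- ===== CLAIM (what is proved, stated in full; the proofs are below) =====
def Claim_equal_filter_shit_out : Prop := ∀ (text : String), Dom_filter_shit_out text → Spec_filter_shit_out text (filter_shit_out text)

-- ===== LEMMAS AND PROOFS =====

-- the slice B keeps of a suffix that starts at the first alnum char
def pvE (l : List Char) : List Char := l.take ((pvEndB l).getD l.length)

set_option maxRecDepth 8192 in
theorem pvAlnumB_eq : pvAlnumB = pvLettersA := by decide

theorem pvAlnumB_contains (c : Char) : pvAlnumB.contains c = pvLettersA.contains c := by
  rw [pvAlnumB_eq]; simp

theorem pvE_single (c : Char) : pvE [c] = [c] := rfl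

theorem pvE_cons (c d : Char) (r : List Char)
    (h : (!pvLettersA.contains c && !pvLettersA.contains d) = false) :
    pvE (c :: d :: r) = c :: pvE (d :: r) := by
  have hc : (!pvAlnumB.contains c && !pvAlnumB.contains d) = false := by
    rw [pvAlnumB_contains, pvAlnumB_contains]; exact h
  unfold pvE
  rw [pvEndB, hc]
  cases hE : pvEndB (d :: r) <;> simp

-- main loop invariant: from state (add_to_list = true), A appends exactly pvE of the rest
theorem pvLoopA_true (l : List Char) (acc : List Char) (b : Bool) :
    pvLoopA l acc true b = acc ++ pvE l := by
  induction l using pvEndB.induct generalizing acc b with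
  | case1 c d r hcond =>
    rw [Bool.and_eq_true, Bool.not_eq_eq_eq_not, Bool.not_eq_eq_eq_not] at hcond
    rw [pvAlnumB_contains, pvAlnumB_contains] at hcond
    unfold pvE
    rw [pvEndB]
    rw [pvAlnumB_contains, pvAlnumB_contains, hcond.1, hcond.2]
    simp [pvLoopA, show c ∉ pvLettersA by simpa using hcond.1,
      show d ∉ pvLettersA by simpa using hcond.2]
  | case2 c d r hcond ih =>
    rw [Bool.not_eq_true, Bool.and_eq_false_iff] at hcond
    have hcond' : (!pvLettersA.contains c && !pvLettersA.contains d) = false := by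
      rw [Bool.and_eq_false_iff]
      rcases hcond with h' | h' <;> rw [pvAlnumB_contains] at h' <;> [left; right] <;> exact h'
    rw [pvE_cons c d r hcond']
    by_cases hc : pvLettersA.contains c = true
    · rw [pvLoopA, if_pos hc, ih]
      simp
    · have hd : pvLettersA.contains d = true := by
        rcases Bool.and_eq_false_iff.mp hcond' with h' | h'
        · simp at h'; simp [h'] at hc
        · simpa using h'
      have step : pvLoopA (d :: r) (acc ++ [c]) true true
          = pvLoopA r (acc ++ [c] ++ [d]) true true := by
        rw [pvLoopA, if_pos hd]
      rw [pvLoopA, if_neg hc]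
      rw [pvLoopA, if_pos hd, ← step, ih]
      simp
  | case3 l h =>
    rcases l with _ | ⟨c, _ | ⟨d, r⟩⟩
    · simp [pvLoopA, pvE]
    · by_cases hc : pvLettersA.contains c = true
      · rw [pvLoopA, if_pos hc, pvLoopA, pvE_single]
      · rw [pvLoopA, if_neg hc]
        simp [pvLoopA, pvE_single]
    · exact absurd rfl (h c d r)

theorem pvLoopA_start (l : List Char) :
    pvLoopA l [] false false = pvE (l.dropWhile (fun c => !pvLettersA.contains c)) := by
  induction l with
  | nil => rfl
  | cons c r ih =>
    by_cases hc : pvLettersA.contains c = true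
    · rw [pvLoopA, if_pos hc, pvLoopA_true, List.dropWhile_cons_of_neg (by simpa using hc)]
      have hE : pvE (c :: r) = c :: pvE r := by
        cases r with
        | nil => exact pvE_single c
        | cons d r' => exact pvE_cons c d r' (by rw [hc]; rfl)
      rw [hE]; rfl
    · rw [pvLoopA, if_neg hc]
      simp only [Bool.false_eq_true, if_false]
      rw [ih, List.dropWhile_cons_of_pos (by simpa using hc)]

theorem pvStartB_drop (l : List Char) :
    l.drop (pvStartB l) = l.dropWhile (fun c => !pvLettersA.contains c) := by
  induction l with
  | nil => rfl
  | cons c r ih =>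
    rw [pvStartB]
    by_cases hc : pvLettersA.contains c = true
    · rw [pvAlnumB_contains, if_pos hc, List.dropWhile_cons_of_neg (by simpa using hc)]
      rfl
    · rw [pvAlnumB_contains, if_neg hc,
        List.dropWhile_cons_of_pos (by simpa using hc), List.drop_succ_cons, ih]

-- ===== VERDICT (by name: the statement is the Claim_ definition above) =====
theorem filter_shit_out_spec : Claim_equal_filter_shit_out := by
  intro text _
  unfold Spec_filter_shit_out filter_shit_out filter_shit_out_alt
  rw [pvLoopA_start, ← pvStartB_drop]
  cases hE : pvEndB (text.toList.drop (pvStartB text.toList)) with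
  | some k => simp [pvE, hE]
  | none => simp [pvE, hE]
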